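-- pv_equiv track=rewrite | github.com/DaisioSK/CS5446-Warehouse-Robot | grid_planning.py | _cell_at_time
-- ===== SOURCE A (Python) =====
-- from typing import Dict, List, Optional, Sequence, Tuple, Set
--
-- def _cell_at_time(path: List[Optional[Tuple[int, int]]], t: int) -> Optional[Tuple[int, int]]:
--     if not path:
--         return None
--     if t < len(path) and path[t] is not None:
--         return path[t]
--     for idx in range(min(t, len(path) - 1), -1, -1):
--         if path[idx] is not None:
--             return path[idx]
--     return None
-- ===== SOURCE B (Python) =====
-- def _cell_at_time(path, t):
--     if not path:
--         return None
--     if t < len(path) and path[t] is not None: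
--         return path[t]
--     m = min(t, len(path) - 1)
--     if m < 0:
--         return None
--     hits = [c for c in path[:m + 1] if c is not None]
--     return hits[-1] if hits else None
-- ===== Notes on version B (the rewrite author's own statement) =====
-- stated objective: alternative
-- what changed: The backward early-return index scan is replaced by a staged pipeline: slice the relevant prefix, filter out the None entries into a list, and return that list's last element; the empty-path guard and the fast-path lookup (which carries Python's negative-index semantics) are kept.
import Mathlib
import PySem

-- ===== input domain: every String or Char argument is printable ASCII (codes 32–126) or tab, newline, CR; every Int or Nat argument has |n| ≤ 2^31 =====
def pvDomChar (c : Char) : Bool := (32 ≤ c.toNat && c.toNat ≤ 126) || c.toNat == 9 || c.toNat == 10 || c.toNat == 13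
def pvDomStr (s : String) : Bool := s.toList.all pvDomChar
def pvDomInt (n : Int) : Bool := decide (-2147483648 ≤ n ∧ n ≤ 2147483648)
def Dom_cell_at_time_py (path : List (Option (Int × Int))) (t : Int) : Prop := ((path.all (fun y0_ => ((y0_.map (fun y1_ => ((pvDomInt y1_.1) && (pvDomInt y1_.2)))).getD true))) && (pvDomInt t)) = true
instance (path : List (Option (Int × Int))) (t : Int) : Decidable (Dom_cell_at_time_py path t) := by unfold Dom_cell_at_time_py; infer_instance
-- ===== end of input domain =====

-- B replaces A's backward early-return index scan by a staged pipeline (slice the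
-- prefix, filter out the Nones, take the last element); objective: alternative, same cost.

-- ===== PORT A =====
-- A's backward loop `for idx in range(min(t, len(path)-1), -1, -1)` with early return
def pvScanA (path : List (Option (Int × Int))) : List Int → Option (Int × Int)
  | [] => none
  | i :: rest =>
    match PySem.List.pyGetD path i none with
    | some c => some c
    | none => pvScanA path rest

def cell_at_time_py (path : List (Option (Int × Int))) (t : Int) : Option (Int × Int) :=
  if path = [] then none
  else if t < (path.length : Int) ∧ PySem.List.pyGetD path t none ≠ none then
    PySem.List.pyGetD path t none
  else pvScanA path (PySem.List.pyRange (min t ((path.length : Int) - 1)) (-1) (-1))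

-- ===== PORT B =====
def cell_at_time_py_alt (path : List (Option (Int × Int))) (t : Int) : Option (Int × Int) :=
  if path = [] then none
  else if t < (path.length : Int) ∧ PySem.List.pyGetD path t none ≠ none then
    PySem.List.pyGetD path t none
  else
    let m := min t ((path.length : Int) - 1)
    if m < 0 then none
    else
      let hits := (PySem.List.slice path none (some (m + 1))).filter (fun c => c.isSome)
      if hits = [] then none else PySem.List.pyGetD hits (-1) none

-- ===== PRECONDITION & SPEC =====
-- Pre_ excludes exactly the inputs where Python A raises IndexError: non-empty path with t < -len(path).
def Pre_cell_at_time_py (path : List (Option (Int × Int))) (t : Int) : Prop :=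
  path = [] ∨ -(path.length : Int) ≤ t
instance (path : List (Option (Int × Int))) (t : Int) : Decidable (Pre_cell_at_time_py path t) := by
  unfold Pre_cell_at_time_py; infer_instance
def pvWitness_cell_at_time_py : (List (Option (Int × Int))) × Int := ([some (1, 2), none], 3)

def Spec_cell_at_time_py (path : List (Option (Int × Int))) (t : Int) (out : Option (Int × Int)) : Prop := out = cell_at_time_py_alt path t
instance (path : List (Option (Int × Int))) (t : Int) (out : Option (Int × Int)) : Decidable (Spec_cell_at_time_py path t out) := by unfold Spec_cell_at_time_py; infer_instance

-- ===== CLAIM (what is proved, stated in full; the proofs are below) =====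
def Claim_equal_cell_at_time_py : Prop := ∀ (path : List (Option (Int × Int))) (t : Int), Dom_cell_at_time_py path t → Pre_cell_at_time_py path t → Spec_cell_at_time_py path t (cell_at_time_py path t)

-- ===== LEMMAS AND PROOFS =====

-- A's backward early-return scan over 0..k equals "last non-None entry of take (k+1)".
lemma scanA_eq_last_filter (path : List (Option (Int × Int))) (k : Nat) :
    pvScanA path (PySem.List.pyRange (k : Int) (-1) (-1)) =
      (((path.take (k + 1)).filter (fun c => c.isSome)).getLast?).getD none := by
  induction k with
  | zero =>
    rw [PySem.List.pyRange_neg_one_cons (by omega)]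
    rw [show ((0 : Nat) : Int) - 1 = -1 by simp,
        PySem.List.pyRange_neg_one_eq_nil (by omega)]
    rw [show path.take 1 = path.take 0 ++ path[0]?.toList from List.take_add_one]
    simp only [List.take_zero, List.nil_append]
    cases h : path[0]? with
    | none =>
      have : PySem.List.pyGetD path (0 : Int) none = none := by
        simp [PySem.List.pyGetD_zero, List.getD, h]
      simp [pvScanA, this]
    | some c =>
      have : PySem.List.pyGetD path (0 : Int) none = c := by
        simp [PySem.List.pyGetD_zero, List.getD, h]
      cases c with
      | none => simp [pvScanA, this]
      | some v => simp [pvScanA, this]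
  | succ n ih =>
    rw [PySem.List.pyRange_neg_one_cons (by omega),
        show ((n + 1 : Nat) : Int) - 1 = (n : Int) by push_cast; ring]
    rw [show path.take (n + 1 + 1) = path.take (n + 1) ++ path[n + 1]?.toList from
          List.take_add_one]
    rw [List.filter_append]
    cases h : path[n + 1]? with
    | none =>
      have hg : PySem.List.pyGetD path ((n + 1 : Nat) : Int) none = none := by
        rw [PySem.List.pyGetD_natCast]
        simp [List.getD, h]
      simp only [pvScanA, hg, Option.toList_none, List.filter_nil, List.append_nil]
      exact ih
    | some c =>
      have hg : PySem.List.pyGetD path ((n + 1 : Nat) : Int) none = c := by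
        rw [PySem.List.pyGetD_natCast]
        simp [List.getD, h]
      cases c with
      | none =>
        simp only [pvScanA, hg, Option.toList_some, List.filter_cons]
        simp only [Option.isSome_none, Bool.false_eq_true, if_false, List.filter_nil,
          List.append_nil]
        exact ih
      | some v =>
        have hg' : PySem.List.pyGetD path ((n : Int) + 1) none = some v := by
          rw [show ((n : Int) + 1) = ((n + 1 : Nat) : Int) by push_cast; ring]; exact hg
        simp [pvScanA, hg']

-- the staged "last of the filtered list" written with pyGetD (-1) is getLast?.getD
lemma last_hit_eq (hits : List (Option (Int × Int))) :
    (if hits = [] then (none : Option (Int × Int))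
     else PySem.List.pyGetD hits (-1) none) = (hits.getLast?).getD none := by
  by_cases h : hits = []
  · subst h; simp
  · rw [if_neg h, PySem.List.pyGetD_neg_one hits none h,
        List.getLast?_eq_some_getLast h]
    rfl

-- ===== VERDICT (by name: the statement is the Claim_ definition above) =====
theorem cell_at_time_py_spec : Claim_equal_cell_at_time_py := by
  intro path t _ _
  unfold Spec_cell_at_time_py cell_at_time_py cell_at_time_py_alt
  split_ifs with h1 h2
  · rfl
  · rfl
  · -- loop branch: A's backward scan vs B's slice-filter-last pipeline
    set m : Int := min t ((path.length : Int) - 1) with hm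
    by_cases hneg : m < 0
    · rw [if_pos hneg, PySem.List.pyRange_neg_one_eq_nil (by omega)]
      rfl
    · rw [if_neg hneg]
      have hm0 : 0 ≤ m := by omega
      have hcast : m = ((m.toNat : Nat) : Int) := by omega
      have hslice : PySem.List.slice path none (some (m + 1)) = path.take (m.toNat + 1) := by
        rw [PySem.List.slice_to path (by omega)]
        congr 1
        omega
      rw [hslice, last_hit_eq]
      rw [hcast]
      exact scanA_eq_last_filter path m.toNat
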